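-- pv_equiv track=rewrite | github.com/Lyon673/Adaptive_scaling | Trajectory/models_seq_comp_vis.py | get_continuous_segments
-- ===== SOURCE A (Python) =====
-- def get_continuous_segments(labels):
--     """将一维标签数组转换为连续段: [(start, end, class_id), ...]"""
--     segments = []
--     if len(labels) == 0: return segments
--
--     start = 0
--     current_label = labels[0]
--     for i in range(1, len(labels)):
--         if labels[i] != current_label:
--             segments.append((start, i, current_label))
--             start = i
--             current_label = labels[i]
--
--     segments.append((start, len(labels), current_label))
--     return segments
-- ===== SOURCE B (Python) =====
-- def get_continuous_segments(labels):
--     if len(labels) == 0: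
--         return []
--     boundaries = [0]
--     for i in range(1, len(labels)):
--         if labels[i] != labels[i - 1]:
--             boundaries.append(i)
--     boundaries.append(len(labels))
--     return [(s, e, labels[s]) for s, e in zip(boundaries, boundaries[1:])]
-- ===== Notes on version B (the rewrite author's own statement) =====
-- stated objective: alternative
-- what changed: B first collects all boundary indices (cut points where the label changes, plus 0 and len) in one pass, then assembles the segment triples in a second pass by zipping adjacent boundaries, instead of emitting segments inline while tracking a running current_label/start state.
import Mathlib
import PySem

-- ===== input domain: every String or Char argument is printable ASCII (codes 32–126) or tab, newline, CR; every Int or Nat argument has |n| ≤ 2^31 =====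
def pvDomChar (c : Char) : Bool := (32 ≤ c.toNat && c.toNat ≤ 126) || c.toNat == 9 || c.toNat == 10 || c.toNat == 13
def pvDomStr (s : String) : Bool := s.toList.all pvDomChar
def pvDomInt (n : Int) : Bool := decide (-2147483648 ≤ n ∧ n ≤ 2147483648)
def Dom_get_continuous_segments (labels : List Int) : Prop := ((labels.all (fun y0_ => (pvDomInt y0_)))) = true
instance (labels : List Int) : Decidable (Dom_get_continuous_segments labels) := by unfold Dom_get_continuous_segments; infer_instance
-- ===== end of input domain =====

-- B collects all boundary indices first, then zips adjacent boundaries into segments,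
-- instead of A's inline emission with a running start/current_label state (alternative decomposition, same cost).

-- ===== PORT A =====
-- A's loop body: state = (segments, start, current_label)
def pvStepA (labels : List Int) (st : List (Int × Int × Int) × Int × Int) (i : Int) :
    List (Int × Int × Int) × Int × Int :=
  if PySem.List.pyGetD labels i 0 ≠ st.2.2 then
    (st.1 ++ [(st.2.1, i, st.2.2)], i, PySem.List.pyGetD labels i 0)
  else st

def get_continuous_segments (labels : List Int) : List (Int × Int × Int) :=
  if labels.length = 0 then [] else
  let st := (PySem.List.pyRange 1 (labels.length : Int) 1).foldl (pvStepA labels)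
              ([], 0, PySem.List.pyGetD labels 0 0)
  st.1 ++ [(st.2.1, (labels.length : Int), st.2.2)]

-- ===== PORT B =====
def get_continuous_segments_alt (labels : List Int) : List (Int × Int × Int) :=
  if labels.length = 0 then [] else
  let boundaries :=
    ((PySem.List.pyRange 1 (labels.length : Int) 1).foldl
      (fun acc i =>
        if PySem.List.pyGetD labels i 0 ≠ PySem.List.pyGetD labels (i - 1) 0 then acc ++ [i]
        else acc) [0]) ++ [(labels.length : Int)]
  (boundaries.zip (boundaries.drop 1)).map (fun p => (p.1, p.2, PySem.List.pyGetD labels p.1 0))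

-- ===== PRECONDITION & SPEC =====
def Spec_get_continuous_segments (labels : List Int) (out : List (Int × Int × Int)) : Prop := out = get_continuous_segments_alt labels
instance (labels : List Int) (out : List (Int × Int × Int)) : Decidable (Spec_get_continuous_segments labels out) := by unfold Spec_get_continuous_segments; infer_instance

-- ===== CLAIM (what is proved, stated in full; the proofs are below) =====
def Claim_equal_get_continuous_segments : Prop := ∀ (labels : List Int), Dom_get_continuous_segments labels → Spec_get_continuous_segments labels (get_continuous_segments labels)

-- ===== LEMMAS AND PROOFS =====

-- segments generated from a start index and the remaining interior boundaries
def pvSegsFrom (labels : List Int) (n : Int) : Int → List Int → List (Int × Int × Int)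
  | s, [] => [(s, n, PySem.List.pyGetD labels s 0)]
  | s, b :: bs => (s, b, PySem.List.pyGetD labels s 0) :: pvSegsFrom labels n b bs

lemma pvZipSegs (labels : List Int) (n : Int) (mid : List Int) : ∀ (s : Int),
    (((s :: mid) ++ [n]).zip (mid ++ [n])).map
      (fun p => (p.1, p.2, PySem.List.pyGetD labels p.1 0))
    = pvSegsFrom labels n s mid := by
  induction mid with
  | nil => intro s; simp [pvSegsFrom]
  | cons b bs ih => intro s; simp only [List.cons_append, List.zip_cons_cons, List.map_cons, pvSegsFrom]
                    exact congrArg _ (ih b)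

lemma pvFoldA (labels : List Int) (n : Int) : ∀ (k : Nat), ∀ (j s : Int) (segs : List (Int × Int × Int)),
    j = n - k → 1 ≤ j →
    PySem.List.pyGetD labels (j - 1) 0 = PySem.List.pyGetD labels s 0 →
    (let st := (PySem.List.pyRange j n 1).foldl (pvStepA labels)
                 (segs, s, PySem.List.pyGetD labels s 0)
     st.1 ++ [(st.2.1, n, st.2.2)])
    = segs ++ pvSegsFrom labels n s
        ((PySem.List.pyRange j n 1).filter
          (fun i => PySem.List.pyGetD labels i 0 ≠ PySem.List.pyGetD labels (i - 1) 0)) := by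
  intro k
  induction k with
  | zero =>
    intro j s segs hj _ _
    have : n ≤ j := by omega
    simp [PySem.List.pyRange_one_eq_nil this, pvSegsFrom]
  | succ k ih =>
    intro j s segs hj hj1 hprev
    have hlt : j < n := by omega
    rw [PySem.List.pyRange_one_cons hlt]
    by_cases hc : PySem.List.pyGetD labels j 0 = PySem.List.pyGetD labels (j - 1) 0
    · -- label unchanged: state kept, boundary filtered out
      have hstep : pvStepA labels (segs, s, PySem.List.pyGetD labels s 0) j
          = (segs, s, PySem.List.pyGetD labels s 0) := by
        simp [pvStepA, hc, hprev]
      simp only [List.foldl_cons, List.filter_cons, hstep]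
      have hcf : ¬ (PySem.List.pyGetD labels j 0 ≠ PySem.List.pyGetD labels (j - 1) 0) := by
        simpa using hc
      simp only [hcf, decide_false, if_false, Bool.false_eq_true]
      exact ih (j + 1) s segs (by omega) (by omega) (by simpa using hc.trans hprev)
    · -- label changed: emit segment, boundary kept
      have hstep : pvStepA labels (segs, s, PySem.List.pyGetD labels s 0) j
          = (segs ++ [(s, j, PySem.List.pyGetD labels s 0)], j, PySem.List.pyGetD labels j 0) := by
        simp [pvStepA, hprev ▸ hc]
      simp only [List.foldl_cons, List.filter_cons, hstep]
      have hct : (PySem.List.pyGetD labels j 0 ≠ PySem.List.pyGetD labels (j - 1) 0) := hc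
      simp only [hct, ne_eq, decide_not]
      rw [ih (j + 1) j (segs ++ [(s, j, PySem.List.pyGetD labels s 0)]) (by omega) (by omega)
            (by simp)]
      simp [pvSegsFrom]

-- ===== VERDICT (by name: the statement is the Claim_ definition above) =====
theorem get_continuous_segments_spec : Claim_equal_get_continuous_segments := by
  intro labels _
  unfold Spec_get_continuous_segments get_continuous_segments get_continuous_segments_alt
  by_cases h0 : labels.length = 0
  · simp [h0]
  · simp only [h0, if_false]
    have hfold := pvFoldA labels (labels.length : Int) (labels.length - 1) 1 0 []
      (by omega) (by omega) (by norm_num)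
    simp only [] at hfold
    rw [hfold]
    rw [PySem.List.foldl_append_ite_eq_filter]
    simp only [List.cons_append, List.drop_succ_cons, List.drop_zero]
    rw [← List.cons_append, pvZipSegs]
    simp
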